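-- pv_equiv track=rewrite | github.com/roca12/gpccodes | Faltantes o por revisar/LexoSmallest.py | compareSeq
-- ===== SOURCE A (Python) =====
-- def compareSeq(S, x, y, n):
--     for i in range (n):
--         if (S[x] < S[y]):
--             return False
--         elif (S[x] > S[y]):
--             return True
--         x = (x + 1) % n
--         y = (y + 1) % n
--     return True
--
-- S = "DCACBCAA"
--
-- n = 8
-- ===== SOURCE B (Python) =====
-- def compareSeq(S, x, y, n):
--     rot_x = [S[(x + i) % n] for i in range(n)]
--     rot_y = [S[(y + i) % n] for i in range(n)]
--     return rot_x >= rot_y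
-- ===== Notes on version B (the rewrite author's own statement) =====
-- stated objective: simpler
-- what changed: Instead of walking two modular cursors with early returns inside an explicit loop, B materialises both cyclic rotations of S[0:n] as lists with modular indexing and returns rot_x >= rot_y via Python's built-in lexicographic list comparison; Pre_ excludes inputs where A raises IndexError (start index outside S, or n > len(S) where A raises unless an early return hits first while B always raises) and start cursors outside the rotation window [0, n), an off-contract corner where A's single unreduced first read and B's modular read are equally defensible.
-- outside the precondition, e.g. on compareSeq('BA', 0, 1, 3): A returns True, B raises IndexError; on compareSeq('AB', 0, 1, 1): A returns False, B returns True; on compareSeq('DCACBCAA', 2, 7, 4): A returns False, B returns False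
import Mathlib
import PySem

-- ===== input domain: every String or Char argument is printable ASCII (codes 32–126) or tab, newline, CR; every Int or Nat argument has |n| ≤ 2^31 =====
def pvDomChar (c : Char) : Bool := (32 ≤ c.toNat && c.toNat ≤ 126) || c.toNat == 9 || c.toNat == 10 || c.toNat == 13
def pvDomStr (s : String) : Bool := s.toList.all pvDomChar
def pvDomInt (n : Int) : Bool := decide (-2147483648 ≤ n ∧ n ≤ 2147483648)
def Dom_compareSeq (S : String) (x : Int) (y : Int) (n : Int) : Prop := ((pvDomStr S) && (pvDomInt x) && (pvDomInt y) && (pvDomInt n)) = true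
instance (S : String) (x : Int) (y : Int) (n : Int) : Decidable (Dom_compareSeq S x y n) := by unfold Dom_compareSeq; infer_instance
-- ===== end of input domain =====

-- B replaces A's modular-cursor loop with building both rotation lists and one lexicographic list comparison
-- (simpler decomposition, same cost); equivalence is claimed on Pre_, see its comment.

-- ===== PORT A =====
-- A's loop: for i in range(n): compare S[x], S[y]; advance both cursors mod n.
-- pyGet? = none means the Python IndexError; those inputs are outside Pre_ (port returns false there, unclaimed).
def compareSeqAux (L : List Char) (n : Int) : Int → Int → Nat → Bool
  | _, _, 0 => true
  | x, y, fuel+1 =>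
    match PySem.List.pyGet? L x, PySem.List.pyGet? L y with
    | some a, some b =>
      if a < b then false
      else if b < a then true
      else compareSeqAux L n (PySem.Int.mod (x+1) n) (PySem.Int.mod (y+1) n) fuel
    | _, _ => false

def compareSeq (S : String) (x : Int) (y : Int) (n : Int) : Bool :=
  compareSeqAux S.toList n x y n.toNat

-- ===== PORT B =====
-- rotation list comprehension: [S[(z + i) % n] for i in range(n)]; none = IndexError
def rotList (L : List Char) (z : Int) (n : Int) : Option (List Char) :=
  (PySem.List.pyRange 0 n 1).mapM
    (fun i => PySem.List.pyGet? L (PySem.Int.mod (z + i) n))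

-- Python's list >= (lexicographic)
def lexGE : List Char → List Char → Bool
  | _, [] => true
  | [], _ :: _ => false
  | a :: as, b :: bs => if a < b then false else if b < a then true else lexGE as bs

def compareSeq_alt (S : String) (x : Int) (y : Int) (n : Int) : Bool :=
  match rotList S.toList x n, rotList S.toList y n with
  | some rx, some ry => lexGE rx ry
  | _, _ => false

-- ===== PRECONDITION & SPEC =====
-- Pre_ excludes (a) inputs where A raises IndexError (a start index outside S's range, or n > len(S), where the
-- in-loop modular indices overflow S so A raises unless an early return hits first while B's rotation build always
-- raises), and (b) start cursors outside the rotation window [0, n): the function compares rotations of S[0:n]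
-- and on an out-of-window cursor A's single unreduced first read and B's modular read are equally defensible
-- conventions for an input the function was never meant to take.
def Pre_compareSeq (S : String) (x : Int) (y : Int) (n : Int) : Prop :=
  n ≤ 0 ∨ (n ≤ (S.toList.length : Int) ∧ 0 ≤ x ∧ x < n ∧ 0 ≤ y ∧ y < n)

instance (S : String) (x : Int) (y : Int) (n : Int) : Decidable (Pre_compareSeq S x y n) := by
  unfold Pre_compareSeq; infer_instance

def pvWitness_compareSeq : String × Int × Int × Int := ("DCACBCAA", 0, 3, 8)

def Spec_compareSeq (S : String) (x : Int) (y : Int) (n : Int) (out : Bool) : Prop := out = compareSeq_alt S x y n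
instance (S : String) (x : Int) (y : Int) (n : Int) (out : Bool) : Decidable (Spec_compareSeq S x y n out) := by unfold Spec_compareSeq; infer_instance

-- ===== CLAIM (what is proved, stated in full; the proofs are below) =====
def Claim_equal_compareSeq : Prop := ∀ (S : String) (x : Int) (y : Int) (n : Int), Dom_compareSeq S x y n → Pre_compareSeq S x y n → Spec_compareSeq S x y n (compareSeq S x y n)

-- ===== LEMMAS AND PROOFS =====

-- read a character of S (proof-side; on the indices the proofs reach the default is never hit)
def getC (L : List Char) (i : Int) : Char := (PySem.List.pyGet? L i).getD 'A'

lemma mapM_eq_some_map {α β : Type} (f : α → Option β) (g : α → β) :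
    ∀ l : List α, (∀ a ∈ l, f a = some (g a)) → l.mapM f = some (l.map g) := by
  intro l
  induction l with
  | nil => intro _; rfl
  | cons a t ih =>
    intro h
    have ha := h a (by simp)
    have ht := ih (fun b hb => h b (by simp [hb]))
    simp [List.mapM_cons, ha, ht]

lemma pyGet?_some_of_inRange (L : List Char) (i : Int)
    (h1 : -(L.length : Int) ≤ i) (h2 : i < (L.length : Int)) :
    PySem.List.pyGet? L i = some (getC L i) := by
  have hne : PySem.List.pyGet? L i ≠ none := by
    intro h
    rw [PySem.List.pyGet?_eq_none_iff] at h
    exact h ⟨h1, h2⟩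
  cases hg : PySem.List.pyGet? L i with
  | none => exact absurd hg hne
  | some c => simp [getC, hg]

lemma rotList_eq_some (L : List Char) (z n : Int) (hn : 0 < n)
    (hlen : n ≤ (L.length : Int)) :
    rotList L z n = some ((PySem.List.pyRange 0 n 1).map (fun i => getC L (PySem.Int.mod (z + i) n))) := by
  unfold rotList
  apply mapM_eq_some_map
  intro i _
  have h1 : 0 ≤ PySem.Int.mod (z + i) n := PySem.Int.mod_nonneg _ hn
  have h2 : PySem.Int.mod (z + i) n < n := PySem.Int.mod_lt _ hn
  exact pyGet?_some_of_inRange L _ (by omega) (by omega)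

-- proof-side list of characters A visits, following A's cursor recursion
def chain (L : List Char) (n : Int) : Int → Nat → List Char
  | _, 0 => []
  | z, f+1 => getC L z :: chain L n (PySem.Int.mod (z+1) n) f

-- the iterated-cursor chain, started one step in, is the modular comprehension shifted by j
lemma chain_mod_eq (L : List Char) (n : Int) (hn : 0 < n) :
    ∀ (m : Nat) (x j : Int),
      chain L n (PySem.Int.mod (x + j) n) m
        = (List.range m).map (fun (k : Nat) => getC L (PySem.Int.mod (x + j + (k : Int)) n)) := by
  intro m
  induction m with
  | zero => intro x j; rfl
  | succ m ih =>
    intro x j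
    have hstep : PySem.Int.mod (PySem.Int.mod (x + j) n + 1) n = PySem.Int.mod (x + (j+1)) n := by
      rw [PySem.Int.mod_eq_emod_of_pos hn, PySem.Int.mod_eq_emod_of_pos hn,
          PySem.Int.mod_eq_emod_of_pos hn, Int.emod_add_emod]
      ring_nf
    rw [chain, hstep, ih x (j+1), List.range_succ_eq_map]
    simp only [List.map_cons, List.map_map, Nat.cast_zero, add_zero]
    refine congrArg₂ List.cons rfl ?_
    apply List.map_congr_left
    intro k _
    congr 2
    push_cast
    ring

-- A's visited chain of length n is the raw start character followed by the shifted modular tail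
lemma chain_decomp (L : List Char) (n x : Int) (hn : 0 < n) :
    chain L n x n.toNat
      = getC L x :: (List.range (n.toNat - 1)).map (fun (k : Nat) => getC L (PySem.Int.mod (x + 1 + (k : Int)) n)) := by
  obtain ⟨m, hm⟩ : ∃ m : Nat, n.toNat = m + 1 := ⟨n.toNat - 1, by omega⟩
  rw [hm, chain]
  rw [chain_mod_eq L n hn m x 1]
  simp

-- B's rotation list is the modular start character followed by the same shifted modular tail
lemma rot_decomp (L : List Char) (n x : Int) (hn : 0 < n) :
    (PySem.List.pyRange 0 n 1).map (fun i => getC L (PySem.Int.mod (x + i) n))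
      = getC L (PySem.Int.mod x n) :: (List.range (n.toNat - 1)).map (fun (k : Nat) => getC L (PySem.Int.mod (x + 1 + (k : Int)) n)) := by
  obtain ⟨m, hm⟩ : ∃ m : Nat, n.toNat = m + 1 := ⟨n.toNat - 1, by omega⟩
  rw [PySem.List.pyRange_one]
  have hn' : (n - 0).toNat = m + 1 := by omega
  rw [hn', List.range_succ_eq_map]
  simp only [List.map_cons, List.map_map, Nat.cast_zero, add_zero]
  refine congrArg₂ List.cons rfl ?_
  rw [show n.toNat - 1 = m by omega]
  apply List.map_congr_left
  intro k _
  simp only [Function.comp_apply]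
  congr 2
  push_cast
  ring

-- A's loop equals lexGE on the chains it visits (all in-loop cursor indices stay in range)
lemma auxA_eq_lexGE_chain (L : List Char) (n : Int) (hn : 0 < n)
    (hlen : n ≤ (L.length : Int)) :
    ∀ (fuel : Nat) (x y : Int),
      -(L.length : Int) ≤ x → x < (L.length : Int) →
      -(L.length : Int) ≤ y → y < (L.length : Int) →
      compareSeqAux L n x y fuel = lexGE (chain L n x fuel) (chain L n y fuel) := by
  intro fuel
  induction fuel with
  | zero => intro x y _ _ _ _; rfl
  | succ f ih =>
    intro x y hx1 hx2 hy1 hy2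
    have ha := pyGet?_some_of_inRange L x hx1 hx2
    have hb := pyGet?_some_of_inRange L y hy1 hy2
    rw [chain, chain]
    simp only [compareSeqAux, ha, hb, lexGE]
    have hx1' : 0 ≤ PySem.Int.mod (x+1) n := PySem.Int.mod_nonneg _ hn
    have hx2' : PySem.Int.mod (x+1) n < n := PySem.Int.mod_lt _ hn
    have hy1' : 0 ≤ PySem.Int.mod (y+1) n := PySem.Int.mod_nonneg _ hn
    have hy2' : PySem.Int.mod (y+1) n < n := PySem.Int.mod_lt _ hn
    split_ifs <;> try rfl
    exact ih _ _ (by omega) (by omega) (by omega) (by omega)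

-- ===== VERDICT (by name: the statement is the Claim_ definition above) =====
theorem compareSeq_spec : Claim_equal_compareSeq := by
  intro S x y n _ hpre
  unfold Spec_compareSeq compareSeq compareSeq_alt
  by_cases hn : n ≤ 0
  · have h1 : n.toNat = 0 := by omega
    have h2 : PySem.List.pyRange 0 n 1 = [] := PySem.List.pyRange_one_eq_nil (by omega)
    rw [h1]
    simp [rotList, h2, compareSeqAux, lexGE]
  · rw [not_le] at hn
    rcases hpre with h | ⟨hlen, hx1, hx2, hy1, hy2⟩
    · omega
    · have hmx : PySem.Int.mod x n = x := by
        rw [PySem.Int.mod_eq_emod_of_pos hn]; exact Int.emod_eq_of_lt hx1 hx2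
      have hmy : PySem.Int.mod y n = y := by
        rw [PySem.Int.mod_eq_emod_of_pos hn]; exact Int.emod_eq_of_lt hy1 hy2
      rw [rotList_eq_some S.toList x n hn hlen, rotList_eq_some S.toList y n hn hlen]
      rw [auxA_eq_lexGE_chain S.toList n hn hlen n.toNat x y (by omega) (by omega) (by omega) (by omega),
          chain_decomp S.toList n x hn, chain_decomp S.toList n y hn,
          rot_decomp S.toList n x hn, rot_decomp S.toList n y hn, hmx, hmy]
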